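-- pv_equiv track=rewrite | github.com/UdeM-LBIT/superrec2 | src/superrec2/utils/subsequences.py | subseq_segment_dist
-- ===== SOURCE A (Python) =====
-- def subseq_segment_dist(
--     child: int,
--     parent: int,
--     edges: bool,
-- ) -> int:
--     """
--     Count the number of lost segments between two subsequences.
--
--     :param child: subsequence bitmask
--     :param parent: parent subsequence bitmask
--     :param edges: if True, count lost sequences on the edges of
--         :param:`parent`, if False, ignore them
--     :returns: number of lost segments from :param:`parent` to :param:`child`,
--         or -1 if :param:`child` is not a subsequence of :param:`parent`
--     """
--     in_segm = not edges
--     dist = 0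
--
--     if parent.bit_length() < child.bit_length():
--         return -1
--
--     for _ in range(parent.bit_length()):
--         bit_child = child & 1
--         bit_parent = parent & 1
--
--         if bit_child and not bit_parent:
--             return -1
--
--         if bit_parent:
--             if not bit_child:
--                 if not in_segm:
--                     dist += 1
--                     in_segm = True
--             elif in_segm:
--                 in_segm = False
--
--         child >>= 1
--         parent >>= 1
--
--     if in_segm and not edges:
--         dist -= 1
--
--     return dist
-- ===== SOURCE B (Python) =====
-- def subseq_segment_dist(child, parent, edges):
--     n = parent.bit_length()
--     if n < child.bit_length():
--         return -1
--     s = []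
--     for i in range(n):
--         if (parent >> i) & 1:
--             s.append((child >> i) & 1)
--         elif (child >> i) & 1:
--             return -1
--     runs = sum(1 for a, b in zip([1] + s, s) if b == 0 and a != 0)
--     if edges:
--         return runs
--     if 1 not in s:
--         return -1
--     return runs - (1 if s[0] == 0 else 0) - (1 if s[-1] == 0 else 0)
-- ===== Notes on version B (the rewrite author's own statement) =====
-- stated objective: alternative
-- what changed: A scans bits once with an in_segm/dist state machine mutating child/parent and a final edge correction; B first builds the compacted list of child-bits at parent's set-bit positions, then counts 1->0 transitions via a zip over adjacent pairs, and handles edges=False arithmetically from the first/last element (with an explicit no-1s check).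
import Mathlib
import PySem

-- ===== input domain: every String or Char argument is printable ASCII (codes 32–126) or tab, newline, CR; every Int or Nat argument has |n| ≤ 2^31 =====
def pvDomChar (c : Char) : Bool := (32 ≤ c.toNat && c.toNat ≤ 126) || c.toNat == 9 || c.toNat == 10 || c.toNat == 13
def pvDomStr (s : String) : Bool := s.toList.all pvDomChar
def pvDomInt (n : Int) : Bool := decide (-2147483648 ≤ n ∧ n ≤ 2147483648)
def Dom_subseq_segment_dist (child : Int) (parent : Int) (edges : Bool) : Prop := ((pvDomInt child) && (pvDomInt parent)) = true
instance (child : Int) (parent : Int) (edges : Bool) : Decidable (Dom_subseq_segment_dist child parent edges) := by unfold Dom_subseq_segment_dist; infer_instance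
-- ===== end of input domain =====

-- B replaces A's single interleaved bit-scanning state machine by: build the compacted list of
-- child-bits at parent's set-bit positions, count 1->0 transitions with a zip over adjacent
-- pairs, and fix up the edges=False case arithmetically from the first/last element
-- (objective: alternative decomposition, same cost).

-- ===== PORT A =====
-- Python int.bit_length(): number of bits of |n|
def pyBitLength (x : Int) : Nat := Nat.size x.natAbs

-- the for-loop of A: state (child, parent, in_segm, dist); none = early `return -1`
-- (Int.land / >>> are exactly Python's & and >> on int, two's complement)
def subseqLoopA : Nat → Int → Int → Bool → Int → Option (Bool × Int)
  | 0, _, _, seg, d => some (seg, d)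
  | n+1, c, p, seg, d =>
    let bc : Int := Int.land c 1
    let bp : Int := Int.land p 1
    if bc ≠ 0 ∧ bp = 0 then none
    else
      let st : Bool × Int :=
        if bp ≠ 0 then
          if bc = 0 then
            (if ¬ (seg = true) then (true, d + 1) else (seg, d))
          else if seg = true then (false, d) else (seg, d)
        else (seg, d)
      subseqLoopA n (c >>> (1:Nat)) (p >>> (1:Nat)) st.1 st.2

def subseq_segment_dist (child : Int) (parent : Int) (edges : Bool) : Int :=
  if pyBitLength parent < pyBitLength child then -1
  else
    match subseqLoopA (pyBitLength parent) child parent (!edges) 0 with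
    | none => -1
    | some (seg, d) => if seg = true ∧ ¬ (edges = true) then d - 1 else d

-- ===== PORT B =====
-- body of B's building for-loop (early `return -1` = none)
def pvStepB (c p : Int) (acc : Option (List Int)) (i : Nat) : Option (List Int) :=
  match acc with
  | none => none
  | some s =>
    if Int.land (p >>> i) 1 ≠ 0 then some (s ++ [Int.land (c >>> i) 1])
    else if Int.land (c >>> i) 1 ≠ 0 then none
    else some s

-- `sum(1 for a, b in zip([1] + s, s) if b == 0 and a != 0)`
def pvCountRunsB (s : List Int) : Int :=
  (List.zip ((1:Int) :: s) s).foldl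
    (fun r ab => if ab.2 = 0 ∧ ab.1 ≠ 0 then r + 1 else r) 0

def subseq_segment_dist_alt (child : Int) (parent : Int) (edges : Bool) : Int :=
  let n := pyBitLength parent
  if n < pyBitLength child then -1
  else
    match (List.range n).foldl (pvStepB child parent) (some []) with
    | none => -1
    | some s =>
      let runs := pvCountRunsB s
      if edges then runs
      else if ¬ ((1:Int) ∈ s) then -1
      else runs - (if s.head? = some 0 then 1 else 0)
                - (if s.getLast? = some 0 then 1 else 0)

-- ===== PRECONDITION & SPEC =====
def Spec_subseq_segment_dist (child : Int) (parent : Int) (edges : Bool) (out : Int) : Prop := out = subseq_segment_dist_alt child parent edges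
instance (child : Int) (parent : Int) (edges : Bool) (out : Int) : Decidable (Spec_subseq_segment_dist child parent edges out) := by unfold Spec_subseq_segment_dist; infer_instance

-- ===== CLAIM (what is proved, stated in full; the proofs are below) =====
def Claim_equal_subseq_segment_dist : Prop := ∀ (child : Int) (parent : Int) (edges : Bool), Dom_subseq_segment_dist child parent edges → Spec_subseq_segment_dist child parent edges (subseq_segment_dist child parent edges)

-- ===== LEMMAS AND PROOFS =====

-- recursive reference form of B's building loop
def compactR : Nat → Int → Int → Option (List Int)
  | 0, _, _ => some []
  | n+1, c, p =>
    if Int.land p 1 ≠ 0 then (compactR n (c >>> (1:Nat)) (p >>> (1:Nat))).map (fun t => Int.land c 1 :: t)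
    else if Int.land c 1 ≠ 0 then none
    else compactR n (c >>> (1:Nat)) (p >>> (1:Nat))

-- run counter in A's state-machine form
def runsFrom : Bool → List Int → Int
  | _, [] => 0
  | seg, b :: t => if b = 0 then (if seg then runsFrom true t else runsFrom true t + 1) else runsFrom false t

def endSeg (seg : Bool) : List Int → Bool
  | [] => seg
  | b :: t => endSeg (decide (b = 0)) t

theorem shift_succ (x : Int) (i : Nat) : x >>> (i + 1) = (x >>> (1:Nat)) >>> i := by
  rw [Nat.add_comm, Int.shiftRight_add]

theorem ldiff_one_cases (m : Nat) : Nat.ldiff 1 m = 0 ∨ Nat.ldiff 1 m = 1 := by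
  by_cases h : m.testBit 0
  · left
    apply Nat.eq_of_testBit_eq
    intro i
    rw [Nat.testBit_ldiff]
    cases i with
    | zero => simp [Nat.testBit_zero, h]
    | succ i => simp [Nat.testBit_succ]
  · right
    apply Nat.eq_of_testBit_eq
    intro i
    rw [Nat.testBit_ldiff]
    cases i with
    | zero => simp [Nat.testBit_zero, h]
    | succ i => simp [Nat.testBit_succ]

theorem land_one_cases (x : Int) : Int.land x 1 = 0 ∨ Int.land x 1 = 1 := by
  cases x with
  | ofNat m =>
    have h : Int.land (Int.ofNat m) 1 = Int.ofNat (m &&& 1) := rfl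
    rw [h, Nat.and_one_is_mod]
    rcases Nat.mod_two_eq_zero_or_one m with hm | hm <;> simp [hm]
  | negSucc m =>
    have h : Int.land (Int.negSucc m) 1 = Int.ofNat (Nat.ldiff 1 m) := rfl
    rw [h]
    rcases ldiff_one_cases m with hm | hm <;> simp [hm]

theorem foldl_stepB_none (c p : Int) (l : List Nat) :
    l.foldl (pvStepB c p) none = none := by
  induction l with
  | nil => rfl
  | cons i t ih => simpa [pvStepB] using ih

theorem buildB_gen (n : Nat) : ∀ (c p : Int) (s0 : List Int),
    (List.range n).foldl (pvStepB c p) (some s0) = (compactR n c p).map (s0 ++ ·) := by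
  induction n with
  | zero => intro c p s0; simp [compactR]
  | succ n ih =>
    intro c p s0
    rw [List.range_succ_eq_map, List.foldl_cons, List.foldl_map]
    have hstep : (fun (acc : Option (List Int)) (i : Nat) => pvStepB c p acc (i + 1))
        = pvStepB (c >>> (1:Nat)) (p >>> (1:Nat)) := by
      funext acc i
      cases acc with
      | none => rfl
      | some s =>
        simp only [pvStepB]
        rw [shift_succ c i, shift_succ p i]
    simp only [Nat.succ_eq_add_one, hstep]
    by_cases hp : Int.land p 1 = 0
    · by_cases hc : Int.land c 1 = 0
      · have h0 : pvStepB c p (some s0) 0 = some s0 := by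
          simp [pvStepB, hp, hc]
        rw [h0, ih]
        simp [compactR, hp, hc]
      · have h0 : pvStepB c p (some s0) 0 = none := by
          simp [pvStepB, hp, hc]
        rw [h0, foldl_stepB_none]
        simp [compactR, hp, hc]
    · have h0 : pvStepB c p (some s0) 0 = some (s0 ++ [Int.land c 1]) := by
        simp [pvStepB, hp]
      rw [h0, ih]
      simp only [compactR, if_pos hp]
      cases compactR n (c >>> (1:Nat)) (p >>> (1:Nat)) <;> simp

theorem loopA_eq (n : Nat) : ∀ (c p : Int) (seg : Bool) (d : Int),
    subseqLoopA n c p seg d =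
      match compactR n c p with
      | none => none
      | some s => some (endSeg seg s, d + runsFrom seg s) := by
  induction n with
  | zero => intro c p seg d; simp [subseqLoopA, compactR, endSeg, runsFrom]
  | succ n ih =>
    intro c p seg d
    by_cases hp : Int.land p 1 = 0
    · by_cases hc : Int.land c 1 = 0
      · have hA : subseqLoopA (n+1) c p seg d = subseqLoopA n (c >>> (1:Nat)) (p >>> (1:Nat)) seg d := by
          simp [subseqLoopA, hp, hc]
        rw [hA, ih]
        simp [compactR, hp, hc]
      · have hA : subseqLoopA (n+1) c p seg d = none := by
          simp [subseqLoopA, hp, hc]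
        rw [hA]
        simp [compactR, hp, hc]
    · by_cases hc : Int.land c 1 = 0
      · cases seg with
        | true =>
          have hA : subseqLoopA (n+1) c p true d = subseqLoopA n (c >>> (1:Nat)) (p >>> (1:Nat)) true d := by
            simp [subseqLoopA, hp, hc]
          rw [hA, ih]
          simp only [compactR, if_pos hp, hc]
          cases compactR n (c >>> (1:Nat)) (p >>> (1:Nat)) <;> simp [endSeg, runsFrom, hc]
        | false =>
          have hA : subseqLoopA (n+1) c p false d = subseqLoopA n (c >>> (1:Nat)) (p >>> (1:Nat)) true (d+1) := by
            simp [subseqLoopA, hp, hc]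
          rw [hA, ih]
          simp only [compactR, if_pos hp, hc]
          cases compactR n (c >>> (1:Nat)) (p >>> (1:Nat)) with
          | none => simp
          | some t => simp [endSeg, runsFrom, hc]; omega
      · have hA : subseqLoopA (n+1) c p seg d = subseqLoopA n (c >>> (1:Nat)) (p >>> (1:Nat)) false d := by
          cases hseg : seg <;> simp [subseqLoopA, hp, hc, hseg]
        rw [hA, ih]
        simp only [compactR, if_pos hp]
        cases compactR n (c >>> (1:Nat)) (p >>> (1:Nat)) <;> simp [endSeg, runsFrom, hc]

theorem countRuns_gen (s : List Int) : ∀ (prev r : Int),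
    (List.zip (prev :: s) s).foldl
      (fun r ab => if ab.2 = 0 ∧ ab.1 ≠ 0 then r + 1 else r) r
      = r + runsFrom (decide (prev = 0)) s := by
  induction s with
  | nil => intro prev r; simp [runsFrom]
  | cons b t ih =>
    intro prev r
    have hz : List.zip (prev :: b :: t) (b :: t) = (prev, b) :: List.zip (b :: t) t := rfl
    rw [hz, List.foldl_cons, ih]
    by_cases hb : b = (0:Int)
    · by_cases hprev : prev = (0:Int) <;> simp [runsFrom, hb, hprev] <;> omega
    · simp [runsFrom, hb]

theorem countRunsB_eq (s : List Int) : pvCountRunsB s = runsFrom false s := by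
  have h := countRuns_gen s 1 0
  simpa [pvCountRunsB] using h

theorem runsFrom_false_eq (s : List Int) :
    runsFrom false s = runsFrom true s + (if s.head? = some 0 then 1 else 0) := by
  cases s with
  | nil => simp [runsFrom]
  | cons b t => by_cases hb : b = (0:Int) <;> simp [runsFrom, hb]

theorem compactR_mem (n : Nat) : ∀ (c p : Int) (s : List Int), compactR n c p = some s →
    ∀ b ∈ s, b = 0 ∨ b = 1 := by
  induction n with
  | zero =>
    intro c p s hs b hb
    simp [compactR] at hs
    subst hs; simp at hb
  | succ n ih =>
    intro c p s hs b hb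
    by_cases hp : Int.land p 1 = 0
    · by_cases hc : Int.land c 1 = 0
      · simp only [compactR, hp, hc] at hs
        exact ih _ _ _ (by simpa using hs) b hb
      · simp [compactR, hp, hc] at hs
    · simp only [compactR, if_pos hp, Option.map_eq_some_iff] at hs
      obtain ⟨t, ht, rfl⟩ := hs
      rcases List.mem_cons.mp hb with rfl | hbt
      · exact land_one_cases c
      · exact ih _ _ _ ht b hbt

theorem all_zero_runs (s : List Int) (h01 : ∀ b ∈ s, b = 0 ∨ b = 1) (h : (1:Int) ∉ s) :
    runsFrom true s = 0 ∧ endSeg true s = true := by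
  induction s with
  | nil => simp [runsFrom, endSeg]
  | cons b t ih =>
    have hb : b = 0 := by
      rcases h01 b (by simp) with h0 | h1
      · exact h0
      · exact absurd (h1 ▸ List.mem_cons_self ..) h
    subst hb
    have := ih (fun x hx => h01 x (by simp [hx])) (fun hx => h (by simp [hx]))
    simpa [runsFrom, endSeg] using this

theorem endSeg_last (s : List Int) : ∀ (seg : Bool), s ≠ [] →
    endSeg seg s = decide (s.getLast? = some 0) := by
  induction s with
  | nil => intro seg h; exact absurd rfl h
  | cons b t ih =>
    intro seg _
    cases t with
    | nil => simp [endSeg]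
    | cons b' t' =>
      have h1 : endSeg seg (b :: b' :: t') = endSeg (decide (b = 0)) (b' :: t') := rfl
      rw [h1, ih _ (by simp)]
      simp [List.getLast?_cons_cons]

-- ===== VERDICT (by name: the statement is the Claim_ definition above) =====
theorem subseq_segment_dist_spec : Claim_equal_subseq_segment_dist := by
  intro child parent edges _
  unfold Spec_subseq_segment_dist subseq_segment_dist subseq_segment_dist_alt
  by_cases hbl : pyBitLength parent < pyBitLength child
  · simp [hbl]
  · simp only [if_neg hbl]
    rw [buildB_gen, loopA_eq]
    cases h : compactR (pyBitLength parent) child parent with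
    | none => simp
    | some s =>
      simp only [Option.map_some, List.nil_append]
      cases edges with
      | true =>
        simp [countRunsB_eq]
      | false =>
        simp only [Bool.not_false, Bool.false_eq_true, not_false_iff, and_true,
          if_false, id_eq, zero_add]
        by_cases hm : (1:Int) ∈ s
        · have hne : s ≠ [] := by rintro rfl; simp at hm
          rw [endSeg_last s true hne, countRunsB_eq, runsFrom_false_eq]
          simp only [hm, not_true, if_false]
          split_ifs <;> simp_all <;> omega
        · obtain ⟨hr, he⟩ := all_zero_runs s (compactR_mem _ _ _ _ h) hm
          simp [hm, he, hr]
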